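-- pv_equiv track=rewrite | github.com/ksanu1998/pacman | sudoku.py | get_constraint_number_of_matrix
-- ===== SOURCE A (Python) =====
-- def get_constraint_number_of_matrix(new_matrix, val, x, y):
-- 	new_matrix[x][y] = val
-- 	constraints = 0
-- 	for i in range(0,4):
-- 		for j in range(0,4):
-- 			if new_matrix[i][j]==0:
-- 				for a in range(0,4):
-- 					if a!=i:
-- 						if new_matrix[a][j]!=0:
-- 							constraints+=1
-- 							break
-- 				for b in range(0,4):
-- 					if b!=j:
-- 						if new_matrix[i][b]!=0:
-- 							constraints+=1
-- 							break
-- 	return constraints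
-- ===== SOURCE B (Python) =====
-- def get_constraint_number_of_matrix(new_matrix, val, x, y):
-- 	new_matrix[x][y] = val
-- 	row_filled = [any(new_matrix[i][j] != 0 for j in range(4)) for i in range(4)]
-- 	col_filled = [any(new_matrix[i][j] != 0 for i in range(4)) for j in range(4)]
-- 	return sum(row_filled[i] + col_filled[j]
-- 	           for i in range(4) for j in range(4) if new_matrix[i][j] == 0)
-- ===== Notes on version B (the rewrite author's own statement) =====
-- stated objective: simpler
-- what changed: Replaced A's per-empty-cell break-scans of the row and column (with the a!=i / b!=j exclusion, which is vacuous since the cell itself is 0) by two precomputed row/column 'has a nonzero' tables and a single pass over the 16 cells.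
import Mathlib
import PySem

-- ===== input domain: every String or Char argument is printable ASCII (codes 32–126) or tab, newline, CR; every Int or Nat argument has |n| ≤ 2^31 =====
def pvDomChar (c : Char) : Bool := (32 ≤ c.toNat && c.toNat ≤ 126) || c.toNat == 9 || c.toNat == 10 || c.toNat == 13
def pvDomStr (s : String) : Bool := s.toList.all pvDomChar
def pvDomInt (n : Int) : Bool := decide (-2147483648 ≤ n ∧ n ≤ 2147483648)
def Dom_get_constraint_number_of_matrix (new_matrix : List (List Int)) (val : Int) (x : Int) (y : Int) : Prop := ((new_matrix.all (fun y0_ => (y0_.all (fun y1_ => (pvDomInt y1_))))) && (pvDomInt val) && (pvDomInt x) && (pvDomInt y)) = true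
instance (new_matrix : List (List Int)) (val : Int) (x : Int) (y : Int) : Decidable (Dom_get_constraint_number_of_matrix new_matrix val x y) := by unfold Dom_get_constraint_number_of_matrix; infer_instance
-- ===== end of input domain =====

-- B replaces A's per-empty-cell break-scans (with the vacuous a≠i / b≠j exclusion) by two
-- precomputed row/column "has a nonzero" tables and one pass over the 16 cells.
-- Both A and B mutate new_matrix[x][y] = val in place identically; the claim is about the return value.

-- new_matrix[x][y] = val, Python index semantics (negative index wraps); shared by both ports
def pvSetCell (m : List (List Int)) (x y v : Int) : List (List Int) :=
  let ix := (if x < 0 then x + m.length else x).toNat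
  let row := m.getD ix []
  let iy := (if y < 0 then y + row.length else y).toNat
  m.set ix (row.set iy v)

-- new_matrix[i][j] for the nonnegative in-range loop indices (Pre_ keeps them in range)
def pvCell (m : List (List Int)) (i j : Int) : Int := (m.getD i.toNat []).getD j.toNat 0

-- ===== PORT A =====
-- A's inner 'for a in range(4): if …: constraints += 1; break' loop
def pvBreakScan (p : Int → Bool) : List Int → Int
  | [] => 0
  | a :: r => if p a then 1 else pvBreakScan p r

def get_constraint_number_of_matrix (new_matrix : List (List Int)) (val : Int) (x : Int) (y : Int) : Int :=
  let m := pvSetCell new_matrix x y val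
  (PySem.List.pyRange 0 4 1).foldl (fun c i =>
    (PySem.List.pyRange 0 4 1).foldl (fun c j =>
      if pvCell m i j == 0 then
        let c := c + pvBreakScan (fun a => a != i && pvCell m a j != 0) (PySem.List.pyRange 0 4 1)
        c + pvBreakScan (fun b => b != j && pvCell m i b != 0) (PySem.List.pyRange 0 4 1)
      else c) c) 0

-- ===== PORT B =====
def get_constraint_number_of_matrix_alt (new_matrix : List (List Int)) (val : Int) (x : Int) (y : Int) : Int :=
  let m := pvSetCell new_matrix x y val
  let rowFilled := (PySem.List.pyRange 0 4 1).map (fun i => (PySem.List.pyRange 0 4 1).any (fun j => pvCell m i j != 0))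
  let colFilled := (PySem.List.pyRange 0 4 1).map (fun j => (PySem.List.pyRange 0 4 1).any (fun i => pvCell m i j != 0))
  (((PySem.List.pyRange 0 4 1).flatMap (fun i => (PySem.List.pyRange 0 4 1).filterMap (fun j =>
      if pvCell m i j == 0 then
        some ((if rowFilled.getD i.toNat false then (1:Int) else 0) + (if colFilled.getD j.toNat false then 1 else 0))
      else none))).sum)

-- ===== PRECONDITION & SPEC =====
-- Pre_ = exactly where Python A returns: the assignment's indices are in range and the
-- fixed 4×4 loops stay in range (at least 4 rows, the first four of length ≥ 4).
def Pre_get_constraint_number_of_matrix (new_matrix : List (List Int)) (val : Int) (x : Int) (y : Int) : Prop :=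
  4 ≤ new_matrix.length ∧
  (-(new_matrix.length : Int) ≤ x ∧ x < new_matrix.length) ∧
  (-((new_matrix.getD (if x < 0 then x + new_matrix.length else x).toNat []).length : Int) ≤ y ∧
    y < ((new_matrix.getD (if x < 0 then x + new_matrix.length else x).toNat []).length : Int)) ∧
  (∀ i < 4, 4 ≤ (new_matrix.getD i []).length)
instance (new_matrix : List (List Int)) (val : Int) (x : Int) (y : Int) : Decidable (Pre_get_constraint_number_of_matrix new_matrix val x y) := by unfold Pre_get_constraint_number_of_matrix; infer_instance

def pvWitness_get_constraint_number_of_matrix : List (List Int) × Int × Int × Int :=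
  ([[0,0,0,0],[0,2,0,0],[0,0,0,0],[0,0,0,3]], 1, 0, 0)

def Spec_get_constraint_number_of_matrix (new_matrix : List (List Int)) (val : Int) (x : Int) (y : Int) (out : Int) : Prop := out = get_constraint_number_of_matrix_alt new_matrix val x y
instance (new_matrix : List (List Int)) (val : Int) (x : Int) (y : Int) (out : Int) : Decidable (Spec_get_constraint_number_of_matrix new_matrix val x y out) := by unfold Spec_get_constraint_number_of_matrix; infer_instance

-- ===== CLAIM (what is proved, stated in full; the proofs are below) =====
def Claim_equal_get_constraint_number_of_matrix : Prop := ∀ (new_matrix : List (List Int)) (val : Int) (x : Int) (y : Int), Dom_get_constraint_number_of_matrix new_matrix val x y → Pre_get_constraint_number_of_matrix new_matrix val x y → Spec_get_constraint_number_of_matrix new_matrix val x y (get_constraint_number_of_matrix new_matrix val x y)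

-- ===== LEMMAS AND PROOFS =====

-- the two sides agree for EVERY mutated matrix m (Pre_ is needed only for faithfulness to Python, not for value equality)
lemma pv_sum_flatMap (l : List Int) (f : Int → List Int) :
    (l.flatMap f).sum = (l.map (fun x => (f x).sum)).sum := by
  induction l <;> simp_all

lemma pv_sum_filterMap (l : List Int) (P : Int → Bool) (w : Int → Int) :
    (l.filterMap (fun j => if P j then some (w j) else none)).sum
      = (l.map (fun j => if P j then w j else 0)).sum := by
  induction l with
  | nil => simp
  | cons a t ih => by_cases h : P a <;> simp [h, ih]

lemma pv_scan_eq (f : Int → Int) (i : Int) (hi : i = 0 ∨ i = 1 ∨ i = 2 ∨ i = 3) (h0 : f i = 0) :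
    pvBreakScan (fun a => a != i && f a != 0) [0,1,2,3]
      = if [0,1,2,3].any (fun a => f a != 0) then 1 else 0 := by
  rcases hi with h|h|h|h <;> subst h <;>
    by_cases h0' : f 0 = 0 <;> by_cases h1 : f 1 = 0 <;> by_cases h2 : f 2 = 0 <;>
    by_cases h3 : f 3 = 0 <;> simp_all [pvBreakScan]

lemma pv_getD_map (f : Int → Bool) (i : Int) (hi : i = 0 ∨ i = 1 ∨ i = 2 ∨ i = 3) :
    (([0,1,2,3].map f).getD i.toNat false) = f i := by
  rcases hi with h|h|h|h <;> subst h <;> rfl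

lemma pv_core (m : List (List Int)) :
    (PySem.List.pyRange 0 4 1).foldl (fun c i =>
      (PySem.List.pyRange 0 4 1).foldl (fun c j =>
        if pvCell m i j == 0 then
          let c := c + pvBreakScan (fun a => a != i && pvCell m a j != 0) (PySem.List.pyRange 0 4 1)
          c + pvBreakScan (fun b => b != j && pvCell m i b != 0) (PySem.List.pyRange 0 4 1)
        else c) c) 0
    =
    (((PySem.List.pyRange 0 4 1).flatMap (fun i => (PySem.List.pyRange 0 4 1).filterMap (fun j =>
        if pvCell m i j == 0 then
          some ((if ((PySem.List.pyRange 0 4 1).map (fun i => (PySem.List.pyRange 0 4 1).any (fun j => pvCell m i j != 0))).getD i.toNat false then (1:Int) else 0)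
              + (if ((PySem.List.pyRange 0 4 1).map (fun j => (PySem.List.pyRange 0 4 1).any (fun i => pvCell m i j != 0))).getD j.toNat false then 1 else 0))
        else none))).sum) := by
  have h4 : PySem.List.pyRange 0 4 1 = [0,1,2,3] := by decide
  rw [h4]
  have hstep : ∀ i : Int, (fun (c j : Int) =>
      if pvCell m i j == 0 then
        let c := c + pvBreakScan (fun a => a != i && pvCell m a j != 0) [0,1,2,3]
        c + pvBreakScan (fun b => b != j && pvCell m i b != 0) [0,1,2,3]
      else c)
    = (fun (c j : Int) => c + (if pvCell m i j == 0 then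
        pvBreakScan (fun a => a != i && pvCell m a j != 0) [0,1,2,3]
        + pvBreakScan (fun b => b != j && pvCell m i b != 0) [0,1,2,3] else 0)) := by
    intro i; funext c j; split_ifs <;> [skip; simp] <;> ring
  simp only [hstep, PySem.List.foldl_add, pv_sum_flatMap, pv_sum_filterMap, zero_add]
  refine congrArg List.sum (List.map_congr_left ?_)
  intro i hi
  refine congrArg List.sum (List.map_congr_left ?_)
  intro j hj
  simp only [List.mem_cons, List.not_mem_nil, or_false] at hi hj
  by_cases hc : pvCell m i j = 0
  · rw [pv_getD_map _ i hi, pv_getD_map _ j hj]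
    simp only [hc, BEq.rfl, if_true]
    rw [pv_scan_eq (fun a => pvCell m a j) i hi hc, pv_scan_eq (fun b => pvCell m i b) j hj hc]
    ring
  · simp [hc]

theorem get_constraint_number_of_matrix_spec : Claim_equal_get_constraint_number_of_matrix := by
  intro nm v x y _ _
  show _ = _
  unfold get_constraint_number_of_matrix get_constraint_number_of_matrix_alt
  exact pv_core (pvSetCell nm x y v)
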